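-- pv_equiv track=rewrite | github.com/salihacelik/SocketAssignment | sender.py | calc_2d_parity
-- ===== SOURCE A (Python) =====
-- def calc_2d_parity(text: str) -> str:
--     data_bytes = text.encode('utf-8')
--     width = 8
--
--     # Eğer veri tam 8'e bölünmüyorsa 0 ile doldur (padding)
--     remainder = len(data_bytes) % width
--     if remainder != 0:
--         data_bytes += b'\x00' * (width - remainder)
--
--     rows = [data_bytes[i:i+width] for i in range(0, len(data_bytes), width)]
--
--     row_parities = []
--     col_parities = [0] * width
--
--     for row in rows:
--         r_xor = 0
--         for idx, byte in enumerate(row):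
--             r_xor ^= byte
--             col_parities[idx] ^= byte
--         row_parities.append(r_xor)
--
--     # Sonuç: Satır Hex - Sütun Hex
--     row_hex = "".join([f"{x:02X}" for x in row_parities])
--     col_hex = "".join([f"{x:02X}" for x in col_parities])
--
--     return f"{row_hex}-{col_hex}"
-- ===== SOURCE B (Python) =====
-- def calc_2d_parity(text: str) -> str:
--     data = list(text.encode('utf-8'))
--     if len(data) % 8 != 0:
--         data += [0] * (8 - len(data) % 8)
--
--     def xor_all(chunk):
--         acc = 0
--         for x in chunk:
--             acc ^= x
--         return acc
--
--     def col_xor(c):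
--         acc = 0
--         i = c
--         while i < len(data):
--             acc ^= data[i]
--             i += 8
--         return acc
--
--     row_hex = "".join(f"{xor_all(data[i:i+8]):02X}" for i in range(0, len(data), 8))
--     col_hex = "".join(f"{col_xor(c):02X}" for c in range(8))
--     return f"{row_hex}-{col_hex}"
-- ===== Notes on version B (the rewrite author's own statement) =====
-- stated objective: alternative
-- what changed: A's single combined nested pass that maintains the row-parity list and the column-parity array together is split into two independent passes of different shape: row parities as XOR-folds of contiguous 8-byte slices, and each column parity as a strided index walk (i = c, c+8, ...) over the padded bytes, with no mutable parity array.
import Mathlib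
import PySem

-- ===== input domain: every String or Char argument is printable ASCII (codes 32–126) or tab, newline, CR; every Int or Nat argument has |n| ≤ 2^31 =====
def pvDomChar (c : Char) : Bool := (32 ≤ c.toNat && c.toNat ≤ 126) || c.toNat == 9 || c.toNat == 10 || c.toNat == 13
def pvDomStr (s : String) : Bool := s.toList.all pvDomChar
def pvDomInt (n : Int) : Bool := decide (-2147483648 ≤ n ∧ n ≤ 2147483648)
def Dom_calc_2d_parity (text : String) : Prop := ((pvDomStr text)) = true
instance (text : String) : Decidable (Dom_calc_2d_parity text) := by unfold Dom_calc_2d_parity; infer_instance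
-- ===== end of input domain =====

-- B splits A's single combined row/column accumulation pass into two independent passes of
-- different shape (contiguous 8-byte slice folds for rows, strided index walks for columns);
-- objective: alternative (same O(n) cost).

-- shared formatting helper: f"{x:02X}", exact for 0 ≤ x < 256 (all parities are XORs of bytes)
def pvHexDigit (n : Nat) : Char := if n < 10 then Char.ofNat (48 + n) else Char.ofNat (55 + n)
def pvHex2 (x : Nat) : String := String.ofList [pvHexDigit (x / 16), pvHexDigit (x % 16)]

-- ===== PORT A =====
def calc_2d_parity (text : String) : String :=
  -- text.encode('utf-8'): exact on Dom (all characters are ASCII, code < 128 = one byte each)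
  let data0 : List Nat := text.toList.map (fun c => c.toNat)
  let remainder := data0.length % 8
  let data := if remainder ≠ 0 then data0 ++ List.replicate (8 - remainder) 0 else data0
  let rows := (PySem.List.pyRange 0 (data.length : Int) 8).map
    (fun i => PySem.List.slice data (some i) (some (i + 8)))
  let st := rows.foldl
    (fun (st : List Nat × List Nat) row =>
      let inner := (PySem.List.enumerate row 0).foldl
        (fun (p : Nat × List Nat) ib =>
          (p.1 ^^^ ib.2, PySem.List.pySetD p.2 ib.1 (PySem.List.pyGetD p.2 ib.1 0 ^^^ ib.2)))
        (0, st.2)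
      (st.1 ++ [inner.1], inner.2))
    ([], List.replicate 8 0)
  let row_hex := PySem.Str.join "" (st.1.map (fun x => pvHex2 x))
  let col_hex := PySem.Str.join "" (st.2.map (fun x => pvHex2 x))
  PySem.Str.join "" [row_hex, "-", col_hex]

-- ===== PORT B =====
def pvXorAll (xs : List Nat) : Nat := xs.foldl (fun a x => a ^^^ x) 0

-- the 'while i < len(data): acc ^= data[i]; i += 8' loop of col_xor; data[i] with
-- 0 ≤ i < len(data) checked by the loop guard, so plain getD is exact there
def pvStride (data : List Nat) (acc : Nat) (i : Nat) : Nat :=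
  if i < data.length then pvStride data (acc ^^^ data.getD i 0) (i + 8) else acc
termination_by data.length - i
decreasing_by omega

def calc_2d_parity_alt (text : String) : String :=
  -- text.encode('utf-8'): exact on Dom (all characters are ASCII, code < 128 = one byte each)
  let data0 : List Nat := text.toList.map (fun c => c.toNat)
  let data := if data0.length % 8 ≠ 0 then data0 ++ List.replicate (8 - data0.length % 8) 0 else data0
  let row_hex := PySem.Str.join "" ((PySem.List.pyRange 0 (data.length : Int) 8).map
    (fun i => pvHex2 (pvXorAll (PySem.List.slice data (some i) (some (i + 8))))))
  let col_hex := PySem.Str.join "" ((PySem.List.pyRange 0 8 1).map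
    (fun c => pvHex2 (pvStride data 0 c.toNat)))
  PySem.Str.join "" [row_hex, "-", col_hex]

-- ===== PRECONDITION & SPEC =====
def Spec_calc_2d_parity (text : String) (out : String) : Prop := out = calc_2d_parity_alt text
instance (text : String) (out : String) : Decidable (Spec_calc_2d_parity text out) := by unfold Spec_calc_2d_parity; infer_instance

-- ===== CLAIM (what is proved, stated in full; the proofs are below) =====
def Claim_equal_calc_2d_parity : Prop := ∀ (text : String), Dom_calc_2d_parity text → Spec_calc_2d_parity text (calc_2d_parity text)

-- ===== LEMMAS AND PROOFS =====

-- proof-side view of A's rows list: the padded data cut into 8-byte chunks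
def pvChunks8 (xs : List Nat) : List (List Nat) :=
  if xs = [] then [] else xs.take 8 :: pvChunks8 (xs.drop 8)
termination_by xs.length
decreasing_by rename_i h; cases xs with | nil => exact absurd rfl h | cons a t => simp

lemma pvXorAll_foldl (xs : List Nat) (a : Nat) : xs.foldl (fun a x => a ^^^ x) a = a ^^^ pvXorAll xs := by
  induction xs generalizing a with
  | nil => simp [pvXorAll]
  | cons x t ih =>
    rw [pvXorAll, List.foldl_cons, List.foldl_cons, ih (a ^^^ x), ih (0 ^^^ x)]
    simp [Nat.xor_assoc]

lemma pvXorAll_cons (x : Nat) (xs : List Nat) : pvXorAll (x :: xs) = x ^^^ pvXorAll xs := by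
  rw [pvXorAll, List.foldl_cons, pvXorAll_foldl]; simp

-- proof-side view of A's inner loop effect on col_parities: xor row into cols starting at position s
def pvUpdFrom (cols : List Nat) (s : Nat) (row : List Nat) : List Nat :=
  match row with
  | [] => cols
  | b :: r => pvUpdFrom (cols.set s (cols.getD s 0 ^^^ b)) (s + 1) r

lemma length_pvUpdFrom (row : List Nat) : ∀ (cols : List Nat) (s : Nat),
    (pvUpdFrom cols s row).length = cols.length := by
  induction row with
  | nil => intro cols s; rfl
  | cons b r ih => intro cols s; rw [pvUpdFrom, ih]; simp

lemma pvUpdFrom_getD (row : List Nat) : ∀ (cols : List Nat) (s c : Nat),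
    (pvUpdFrom cols s row).getD c 0 =
      if s ≤ c ∧ c < s + row.length ∧ c < cols.length
      then cols.getD c 0 ^^^ row.getD (c - s) 0 else cols.getD c 0 := by
  induction row with
  | nil =>
    intro cols s c
    rw [pvUpdFrom, if_neg]
    rintro ⟨h1, h2, h3⟩
    simp only [List.length_nil] at h2
    omega
  | cons b r ih =>
    intro cols s c
    have hbr : (b :: r).length = r.length + 1 := rfl
    rw [pvUpdFrom, ih]
    have hlen : (cols.set s (cols.getD s 0 ^^^ b)).length = cols.length := by simp
    by_cases hc : c = s
    · subst hc
      rw [if_neg (by omega)]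
      by_cases hin : c < cols.length
      · rw [if_pos ⟨le_refl c, by omega, hin⟩]
        simp [List.getD, List.getElem?_set_self hin]
      · rw [if_neg (by omega), List.set_eq_of_length_le (by omega)]
    · have hset : (cols.set s (cols.getD s 0 ^^^ b)).getD c 0 = cols.getD c 0 := by
        simp [List.getD, List.getElem?_set_ne (fun h => hc h.symm)]
      by_cases h1 : s + 1 ≤ c ∧ c < s + 1 + r.length ∧ c < cols.length
      · rw [if_pos (by omega), if_pos (by omega), hset]
        have hcs : c - s = (c - (s + 1)) + 1 := by omega
        rw [hcs]
        rfl
      · rw [if_neg (by omega), if_neg (by omega), hset]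

-- A's inner enumerate-loop computes the row xor and xors the row into cols from position s on
lemma pvInnerFold (row : List Nat) : ∀ (s a : Nat) (cols : List Nat),
    (PySem.List.enumerate row (s : Int)).foldl
        (fun (p : Nat × List Nat) ib =>
          (p.1 ^^^ ib.2, PySem.List.pySetD p.2 ib.1 (PySem.List.pyGetD p.2 ib.1 0 ^^^ ib.2)))
        (a, cols)
      = (a ^^^ pvXorAll row, pvUpdFrom cols s row) := by
  induction row with
  | nil => intro s a cols; simp [PySem.List.enumerate_nil, pvXorAll, pvUpdFrom]
  | cons b r ih =>
    intro s a cols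
    rw [PySem.List.enumerate_cons, List.foldl_cons]
    have hcast : (s : Int) + 1 = ((s + 1 : Nat) : Int) := by push_cast; ring
    rw [hcast, ih (s + 1)]
    simp only [PySem.List.pySetD_natCast, PySem.List.pyGetD_natCast]
    rw [pvXorAll_cons, pvUpdFrom, Nat.xor_assoc]

lemma pvInnerFold0 (row : List Nat) (cols : List Nat) :
    (PySem.List.enumerate row 0).foldl
        (fun (p : Nat × List Nat) ib =>
          (p.1 ^^^ ib.2, PySem.List.pySetD p.2 ib.1 (PySem.List.pyGetD p.2 ib.1 0 ^^^ ib.2)))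
        (0, cols)
      = (pvXorAll row, pvUpdFrom cols 0 row) := by
  have h := pvInnerFold row 0 0 cols
  rw [Nat.cast_zero] at h
  rw [h]
  simp

-- A's outer loop splits into the row-parity list and a fold of pvUpdFrom over the rows
lemma pvOuterFold (rows : List (List Nat)) : ∀ (st : List Nat × List Nat),
    rows.foldl
      (fun (st : List Nat × List Nat) row =>
        let inner := (PySem.List.enumerate row 0).foldl
          (fun (p : Nat × List Nat) ib =>
            (p.1 ^^^ ib.2, PySem.List.pySetD p.2 ib.1 (PySem.List.pyGetD p.2 ib.1 0 ^^^ ib.2)))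
          (0, st.2)
        (st.1 ++ [inner.1], inner.2))
      st
    = (st.1 ++ rows.map pvXorAll, rows.foldl (fun cl r => pvUpdFrom cl 0 r) st.2) := by
  induction rows with
  | nil => intro st; simp
  | cons row rest ih =>
    intro st
    rw [List.foldl_cons, ih]
    rw [List.foldl_cons]
    simp [pvInnerFold0]

lemma pvLengthColsFold (rows : List (List Nat)) : ∀ (cols : List Nat),
    (rows.foldl (fun cl r => pvUpdFrom cl 0 r) cols).length = cols.length := by
  induction rows with
  | nil => intro cols; rfl
  | cons row rest ih => intro cols; rw [List.foldl_cons, ih, length_pvUpdFrom]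

lemma pvUpdFrom_zero_getD (row cols : List Nat) (c : Nat) (hc : c < cols.length) :
    (pvUpdFrom cols 0 row).getD c 0 = cols.getD c 0 ^^^ row.getD c 0 := by
  rw [pvUpdFrom_getD]
  by_cases h : c < row.length
  · rw [if_pos ⟨Nat.zero_le c, by omega, hc⟩]
    simp
  · rw [if_neg (by omega), List.getD_eq_default row 0 (by omega)]
    simp

lemma pvColsFold (rows : List (List Nat)) : ∀ (cols : List Nat) (c : Nat), c < cols.length →
    (rows.foldl (fun cl r => pvUpdFrom cl 0 r) cols).getD c 0
      = cols.getD c 0 ^^^ pvXorAll (rows.map (fun r => r.getD c 0)) := by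
  induction rows with
  | nil => intro cols c _; simp [pvXorAll]
  | cons row rest ih =>
    intro cols c hc
    rw [List.foldl_cons, ih _ c (by rw [length_pvUpdFrom]; exact hc),
      pvUpdFrom_zero_getD row cols c hc, List.map_cons, pvXorAll_cons, Nat.xor_assoc]

-- the chunk view of A's rows list
lemma pvRangeChunks : ∀ (n : Nat) (xs : List Nat), xs.length = n → xs.length % 8 = 0 →
    (List.range (xs.length / 8)).map (fun k => (xs.drop (8 * k)).take 8) = pvChunks8 xs := by
  intro n
  induction n using Nat.strong_induction_on with
  | _ n ih =>
    intro xs hn h8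
    by_cases hnil : xs = []
    · subst hnil; simp [pvChunks8]
    · have hlen : 8 ≤ xs.length := by
        have : xs.length ≠ 0 := by simpa using hnil
        omega
      rw [pvChunks8, if_neg hnil]
      have hdiv : xs.length / 8 = (xs.drop 8).length / 8 + 1 := by
        rw [List.length_drop]; omega
      rw [hdiv, List.range_succ_eq_map, List.map_cons, List.map_map]
      have hhead : (xs.drop (8 * 0)).take 8 = xs.take 8 := by norm_num
      rw [hhead]
      congr 1
      have htail := ih (xs.drop 8).length (by rw [List.length_drop]; omega) (xs.drop 8) rfl
        (by rw [List.length_drop]; omega)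
      rw [← htail]
      apply List.map_congr_left
      intro k _
      simp only [Function.comp_apply, List.drop_drop]
      congr 2
      omega

lemma pvRowsEqChunks (xs : List Nat) (h8 : xs.length % 8 = 0) :
    (PySem.List.pyRange 0 (xs.length : Int) 8).map
      (fun i => PySem.List.slice xs (some i) (some (i + 8))) = pvChunks8 xs := by
  rw [PySem.List.pyRange_of_pos 0 (xs.length : Int) (by norm_num)]
  have hcount : (if (0 : Int) < (xs.length : Int)
      then (((xs.length : Int) - 0 + 8 - 1) / 8).toNat else 0) = xs.length / 8 := by
    by_cases hpos : (0 : Int) < (xs.length : Int)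
    · rw [if_pos hpos,
        show ((xs.length : Int) - 0 + 8 - 1) = ((xs.length + 7 : Nat) : Int) from by push_cast; ring,
        show (8 : Int) = ((8 : Nat) : Int) from by norm_num,
        ← Int.natCast_ediv, Int.toNat_natCast]
      omega
    · rw [if_neg hpos]
      have hl : xs.length = 0 := by omega
      omega
  rw [hcount, List.map_map, ← pvRangeChunks xs.length xs rfl h8]
  apply List.map_congr_left
  intro k _
  simp only [Function.comp_apply]
  rw [show (0 : Int) + 8 * (k : Int) = ((8 * k : Nat) : Int) from by push_cast; ring]
  rw [show ((8 * k : Nat) : Int) + 8 = ((8 * k : Nat) : Int) + ((8 : Nat) : Int) from by norm_num]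
  rw [PySem.List.slice_natCast_add]

-- B's strided while-loop, one 8-step at a time
lemma pvStride_shift : ∀ (n : Nat) (data : List Nat) (acc i : Nat), data.length - i = n →
    pvStride data acc (i + 8) = pvStride (data.drop 8) acc i := by
  intro n
  induction n using Nat.strong_induction_on with
  | _ n ih =>
    intro data acc i hn
    conv_lhs => rw [pvStride]
    conv_rhs => rw [pvStride]
    by_cases h : i + 8 < data.length
    · rw [if_pos h, if_pos (by rw [List.length_drop]; omega)]
      have hget : data.getD (i + 8) 0 = (data.drop 8).getD i 0 := by
        rw [List.getD, List.getD, List.getElem?_drop, Nat.add_comm 8 i]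
      rw [hget]
      exact ih (data.length - (i + 8)) (by omega) data _ (i + 8) rfl
    · rw [if_neg h, if_neg (by rw [List.length_drop]; omega)]

lemma pvStrideChunks : ∀ (n : Nat) (data : List Nat), data.length = n → data.length % 8 = 0 →
    ∀ (c acc : Nat), c < 8 →
    pvStride data acc c = acc ^^^ pvXorAll ((pvChunks8 data).map (fun r => r.getD c 0)) := by
  intro n
  induction n using Nat.strong_induction_on with
  | _ n ih =>
    intro data hn h8 c acc hc
    by_cases hnil : data = []
    · subst hnil
      rw [pvStride]
      simp [pvChunks8, pvXorAll]
    · have hlen : 8 ≤ data.length := by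
        have : data.length ≠ 0 := by simpa using hnil
        omega
      conv_lhs => rw [pvStride]
      rw [if_pos (by omega), pvStride_shift (data.length - c) data _ c rfl,
        ih (data.drop 8).length (by rw [List.length_drop]; omega) (data.drop 8) rfl
          (by rw [List.length_drop]; omega) c _ hc]
      conv_rhs => rw [pvChunks8, if_neg hnil]
      rw [List.map_cons, pvXorAll_cons]
      have htake : (data.take 8).getD c 0 = data.getD c 0 := by
        rw [List.getD, List.getD, List.getElem?_take_of_lt hc]
      rw [htake, Nat.xor_assoc]

lemma pvColList (data : List Nat) (h8 : data.length % 8 = 0) :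
    (((PySem.List.pyRange 0 (data.length : Int) 8).map
        (fun i => PySem.List.slice data (some i) (some (i + 8)))).foldl
        (fun cl r => pvUpdFrom cl 0 r) (List.replicate 8 0)).map (fun x => pvHex2 x)
    = (PySem.List.pyRange 0 8 1).map (fun c => pvHex2 (pvStride data 0 c.toNat)) := by
  have hF : ∀ c : Nat, c < 8 →
      (((PySem.List.pyRange 0 (data.length : Int) 8).map
        (fun i => PySem.List.slice data (some i) (some (i + 8)))).foldl
        (fun cl r => pvUpdFrom cl 0 r) (List.replicate 8 0)).getD c 0 = pvStride data 0 c := by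
    intro c hc
    rw [pvColsFold _ _ c (by simpa using hc), pvRowsEqChunks data h8,
      pvStrideChunks data.length data rfl h8 c 0 hc]
    simp only [Nat.zero_xor]
    have hrep : (List.replicate 8 (0 : Nat)).getD c 0 = 0 := by
      interval_cases c <;> rfl
    rw [hrep, Nat.zero_xor]
  apply List.ext_getElem
  · rw [List.length_map, pvLengthColsFold, List.length_replicate, List.length_map,
      PySem.List.length_pyRange_one]
    decide
  · intro k hk1 hk2
    have hk8 : k < 8 := by
      rw [List.length_map, pvLengthColsFold, List.length_replicate] at hk1
      exact hk1
    rw [List.getElem_map, List.getElem_map,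
      ← List.getD_eq_getElem _ 0 (by rw [pvLengthColsFold, List.length_replicate]; exact hk8),
      hF k hk8, PySem.List.getElem_pyRange_one]
    norm_num

lemma pvCore (data : List Nat) (h8 : data.length % 8 = 0) :
    PySem.Str.join "" [
      PySem.Str.join "" ((((PySem.List.pyRange 0 (data.length : Int) 8).map
          (fun i => PySem.List.slice data (some i) (some (i + 8)))).foldl
        (fun (st : List Nat × List Nat) row =>
          let inner := (PySem.List.enumerate row 0).foldl
            (fun (p : Nat × List Nat) ib =>
              (p.1 ^^^ ib.2, PySem.List.pySetD p.2 ib.1 (PySem.List.pyGetD p.2 ib.1 0 ^^^ ib.2)))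
            (0, st.2)
          (st.1 ++ [inner.1], inner.2))
        ([], List.replicate 8 0)).1.map (fun x => pvHex2 x)),
      "-",
      PySem.Str.join "" ((((PySem.List.pyRange 0 (data.length : Int) 8).map
          (fun i => PySem.List.slice data (some i) (some (i + 8)))).foldl
        (fun (st : List Nat × List Nat) row =>
          let inner := (PySem.List.enumerate row 0).foldl
            (fun (p : Nat × List Nat) ib =>
              (p.1 ^^^ ib.2, PySem.List.pySetD p.2 ib.1 (PySem.List.pyGetD p.2 ib.1 0 ^^^ ib.2)))
            (0, st.2)
          (st.1 ++ [inner.1], inner.2))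
        ([], List.replicate 8 0)).2.map (fun x => pvHex2 x))]
    = PySem.Str.join "" [
        PySem.Str.join "" ((PySem.List.pyRange 0 (data.length : Int) 8).map
          (fun i => pvHex2 (pvXorAll (PySem.List.slice data (some i) (some (i + 8)))))),
        "-",
        PySem.Str.join "" ((PySem.List.pyRange 0 8 1).map
          (fun c => pvHex2 (pvStride data 0 c.toNat)))] := by
  rw [pvOuterFold]
  simp only [List.nil_append]
  rw [pvColList data h8]
  congr 2
  simp only [List.map_map]
  rfl

theorem calc_2d_parity_spec : Claim_equal_calc_2d_parity := by
  unfold Claim_equal_calc_2d_parity Spec_calc_2d_parity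
  intro text _
  unfold calc_2d_parity calc_2d_parity_alt
  have hpad : ∀ (d0 : List Nat),
      (if d0.length % 8 ≠ 0 then d0 ++ List.replicate (8 - d0.length % 8) 0 else d0).length % 8
        = 0 := by
    intro d0
    split
    · rename_i h; rw [List.length_append, List.length_replicate]; omega
    · rename_i h; omega
  exact pvCore _ (hpad (text.toList.map (fun c => c.toNat)))
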